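-- pv_equiv track=rewrite | github.com/Archilyse/Archilyse | bin/digitization_partner_importer/digitization_partner_address_handler.py | get_house_number
-- ===== SOURCE A (Python) =====
-- def get_house_number(text: str) -> str:
--     to_keep = []
--     previous_value = ""
--     for value in text:
--         if value.isdigit():
--             to_keep.append(value)
--         elif previous_value.isdigit() and not value.isspace():
--             to_keep.append(value)
--         previous_value = value
--     housenumber = "".join(to_keep)
--     return housenumber
-- ===== SOURCE B (Python) =====
-- def get_house_number(text: str) -> str:
--     out = []
--     i, n = 0, len(text)
--     while i < n:
--         if text[i].isdigit():
--             j = i + 1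
--             while j < n and text[j].isdigit():
--                 j += 1
--             out.append(text[i:j])
--             if j < n and not text[j].isspace():
--                 out.append(text[j])
--             i = j + 1
--         else:
--             i += 1
--     return "".join(out)
-- ===== Notes on version B (the rewrite author's own statement) =====
-- stated objective: alternative
-- what changed: B replaces A's per-character loop with a previous-value register by a run-grouping scan: it consumes each maximal run of digits in one inner loop and then appends the single non-space character that follows the run, instead of deciding char by char from the previous character.
import Mathlib
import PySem

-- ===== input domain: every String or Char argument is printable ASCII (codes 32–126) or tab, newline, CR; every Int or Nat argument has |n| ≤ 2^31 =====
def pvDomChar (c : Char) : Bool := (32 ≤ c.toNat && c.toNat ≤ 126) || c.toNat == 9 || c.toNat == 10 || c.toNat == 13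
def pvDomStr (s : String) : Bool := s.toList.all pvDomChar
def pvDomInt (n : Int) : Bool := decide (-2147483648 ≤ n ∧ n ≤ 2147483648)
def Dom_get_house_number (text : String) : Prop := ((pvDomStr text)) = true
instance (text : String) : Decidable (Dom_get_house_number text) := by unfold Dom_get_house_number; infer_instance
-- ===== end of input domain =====

-- B replaces A's per-character loop (with a previous-value register) by a run-grouping scan
-- over maximal digit runs; same O(n) cost, different decomposition.

-- ===== PORT A =====
-- previous_value is "" or a one-character string in Python; Option Char here, "".isdigit() = false:
def pvOptDigit (prev : Option Char) : Bool :=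
  match prev with
  | none => false
  | some p => PySem.Chars.isdigit p

-- the for-loop: emits per character according to (value, previous_value), then updates previous_value
def pvAGo (prev : Option Char) : List Char → List Char
  | [] => []
  | c :: cs =>
    (if PySem.Chars.isdigit c then [c]
     else if pvOptDigit prev && !PySem.Chars.isspace c then [c]
     else []) ++ pvAGo (some c) cs

def get_house_number (text : String) : String :=
  String.ofList (pvAGo none text.toList)

-- ===== PORT B =====
-- run-grouping scan: consume a maximal digit run, then handle the char right after it
mutual
def pvBGo : List Char → List Char
  | [] => []
  | c :: cs =>
    if PySem.Chars.isdigit c then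
      (c :: cs.takeWhile PySem.Chars.isdigit) ++ pvBAfter (cs.dropWhile PySem.Chars.isdigit)
    else pvBGo cs
termination_by l => l.length
decreasing_by
  · exact Nat.lt_succ_of_le (List.length_dropWhile_le _ _)
  · simp

def pvBAfter : List Char → List Char
  | [] => []
  | d :: ds => (if PySem.Chars.isspace d then [] else [d]) ++ pvBGo ds
termination_by l => l.length
decreasing_by simp
end

def get_house_number_alt (text : String) : String :=
  String.ofList (pvBGo text.toList)

-- ===== PRECONDITION & SPEC =====
def Spec_get_house_number (text : String) (out : String) : Prop := out = get_house_number_alt text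
instance (text : String) (out : String) : Decidable (Spec_get_house_number text out) := by unfold Spec_get_house_number; infer_instance

-- ===== CLAIM (what is proved, stated in full; the proofs are below) =====
def Claim_equal_get_house_number : Prop := ∀ (text : String), Dom_get_house_number text → Spec_get_house_number text (get_house_number text)

-- ===== LEMMAS AND PROOFS =====

-- A's loop body consults the previous value only through pvOptDigit
theorem pvAGo_congr (cs : List Char) (p q : Option Char) (h : pvOptDigit p = pvOptDigit q) :
    pvAGo p cs = pvAGo q cs := by
  cases cs with
  | nil => rfl
  | cons c cs => simp [pvAGo, h]

theorem pv_dropWhile_head {p : Char → Bool} :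
    ∀ (l : List Char) {d : Char} {ds : List Char}, l.dropWhile p = d :: ds → p d = false := by
  intro l
  induction l with
  | nil => intro d ds h; simp [List.dropWhile] at h
  | cons c cs ih =>
    intro d ds h
    by_cases hc : p c = true
    · rw [List.dropWhile_cons_of_pos hc] at h; exact ih h
    · rw [List.dropWhile_cons_of_neg hc] at h
      cases h; simpa using hc

-- after a digit, A's loop emits the maximal digit run then handles the following char
theorem pvAGo_after_digit :
    ∀ (cs : List Char) (p : Char), PySem.Chars.isdigit p = true →
      pvAGo (some p) cs =
        cs.takeWhile PySem.Chars.isdigit ++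
          (match cs.dropWhile PySem.Chars.isdigit with
           | [] => []
           | d :: ds => (if PySem.Chars.isspace d then [] else [d]) ++ pvAGo (some d) ds) := by
  intro cs
  induction cs with
  | nil => intro p hp; rfl
  | cons c cs ih =>
    intro p hp
    by_cases hc : PySem.Chars.isdigit c = true
    · rw [List.takeWhile_cons_of_pos hc, List.dropWhile_cons_of_pos hc]
      simp only [pvAGo, hc, if_true]
      rw [ih c hc]
      simp
    · rw [List.takeWhile_cons_of_neg hc, List.dropWhile_cons_of_neg hc]
      simp only [pvAGo, hc, pvOptDigit, hp]
      by_cases hs : PySem.Chars.isspace c = true <;> simp [hs]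

theorem pvA_eq_pvB : ∀ (n : ℕ) (cs : List Char), cs.length ≤ n → pvAGo none cs = pvBGo cs := by
  intro n
  induction n with
  | zero =>
    intro cs h
    have : cs = [] := List.eq_nil_of_length_eq_zero (Nat.le_zero.mp h)
    subst this; simp [pvAGo, pvBGo]
  | succ m ih =>
    intro cs h
    cases cs with
    | nil => simp [pvAGo, pvBGo]
    | cons c cs =>
      simp only [List.length_cons, Nat.succ_le_succ_iff] at h
      by_cases hc : PySem.Chars.isdigit c = true
      · rw [pvBGo]
        simp only [pvAGo, hc, if_true, pvAGo_after_digit cs c hc]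
        cases hdw : cs.dropWhile PySem.Chars.isdigit with
        | nil => simp [pvBAfter]
        | cons d ds =>
          have hd : PySem.Chars.isdigit d = false := pv_dropWhile_head cs hdw
          have hlen : ds.length ≤ m := by
            have := List.length_dropWhile_le PySem.Chars.isdigit cs
            rw [hdw] at this
            simp only [List.length_cons] at this
            omega
          have : pvAGo (some d) ds = pvBGo ds := by
            rw [pvAGo_congr ds (some d) none (by simp [pvOptDigit, hd])]
            exact ih ds hlen
          simp [pvBAfter, this]
      · rw [pvBGo]
        simp only [pvAGo, hc, pvOptDigit, Bool.false_and, Bool.false_eq_true, if_false,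
          List.nil_append]
        rw [pvAGo_congr cs (some c) none (by simp [pvOptDigit, hc])]
        exact ih cs h

-- ===== VERDICT (by name: the statement is the Claim_ definition above) =====
theorem get_house_number_spec : Claim_equal_get_house_number := by
  intro text _
  unfold Spec_get_house_number get_house_number get_house_number_alt
  exact congrArg String.ofList (pvA_eq_pvB text.toList.length text.toList le_rfl)
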